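-- pv_equiv track=rewrite | github.com/FennexFox/packetflow_foundry | builders/packet-workflow/retained-skills/gh-address-review-threads/scripts/smoke_gh_address_review_threads.py | thread_counts_from_context
-- ===== SOURCE A (Python) =====
-- from typing import Any
--
-- def thread_counts_from_context(context: dict[str, Any]) -> dict[str, int]:
--     threads = [thread for thread in context.get("threads", []) if not thread.get("is_resolved")]
--     outdated = [thread for thread in threads if thread.get("is_outdated")]
--     return {
--         "unresolved": len(threads),
--         "unresolved_non_outdated": len(threads) - len(outdated),
--         "unresolved_outdated": len(outdated),
--     }
-- ===== SOURCE B (Python) =====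
-- def thread_counts_from_context(context):
--     # histogram of threads by their (resolved, outdated) status pair
--     hist = {}
--     for thread in context.get("threads", []):
--         key = (bool(thread.get("is_resolved")), bool(thread.get("is_outdated")))
--         hist[key] = hist.get(key, 0) + 1
--     non_outdated = hist.get((False, False), 0)
--     outdated = hist.get((False, True), 0)
--     return {
--         "unresolved": non_outdated + outdated,
--         "unresolved_non_outdated": non_outdated,
--         "unresolved_outdated": outdated,
--     }
-- ===== Notes on version B (the rewrite author's own statement) =====
-- stated objective: alternative
-- what changed: Replaces A's two staged list filters (build the unresolved list, filter it again, take lengths) by a histogram: one pass tallies threads into a dict keyed by their (resolved, outdated) status pair, and the result is read off two buckets.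
import Mathlib
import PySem

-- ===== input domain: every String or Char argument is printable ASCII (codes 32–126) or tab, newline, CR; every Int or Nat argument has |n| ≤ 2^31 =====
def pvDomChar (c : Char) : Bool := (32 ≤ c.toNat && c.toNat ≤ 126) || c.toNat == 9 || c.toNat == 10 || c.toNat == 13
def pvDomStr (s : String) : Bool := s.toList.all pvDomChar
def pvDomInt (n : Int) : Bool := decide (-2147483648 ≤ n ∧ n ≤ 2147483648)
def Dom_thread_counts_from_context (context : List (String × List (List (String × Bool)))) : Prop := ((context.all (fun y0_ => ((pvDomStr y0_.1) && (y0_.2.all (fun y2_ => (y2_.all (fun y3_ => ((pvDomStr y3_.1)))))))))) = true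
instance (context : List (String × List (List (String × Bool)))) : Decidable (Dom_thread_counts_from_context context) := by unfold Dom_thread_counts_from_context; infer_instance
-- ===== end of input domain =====

-- B replaces A's two staged list filters by a one-pass histogram dict keyed by (resolved, outdated) status pairs (alternative algorithm, same cost).


-- ===== PORT A =====
-- dict.get k default over an association list (first match) — exact for Python's dict.get
def pvGetD {α : Type} (d : List (String × α)) (k : String) (dflt : α) : α :=
  match d with
  | [] => dflt
  | (k', v) :: rest => if k' = k then v else pvGetD rest k dflt

-- threads = [t for t in context.get("threads", []) if not t.get("is_resolved")]
-- outdated = [t for t in threads if t.get("is_outdated")]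
def thread_counts_from_context (context : List (String × List (List (String × Bool)))) : List (String × Int) :=
  let threads := (pvGetD context "threads" []).filter
    (fun t => !(pvGetD t "is_resolved" false))
  let outdated := threads.filter (fun t => pvGetD t "is_outdated" false)
  [("unresolved", (threads.length : Int)),
   ("unresolved_non_outdated", (threads.length : Int) - (outdated.length : Int)),
   ("unresolved_outdated", (outdated.length : Int))]

-- ===== PORT B =====
-- the (resolved, outdated) status pair of one thread
def pvStatusKey (t : List (String × Bool)) : Bool × Bool :=
  (pvGetD t "is_resolved" false, pvGetD t "is_outdated" false)

-- one pass tallying threads into a histogram dict keyed by status pair, then two bucket reads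
def thread_counts_from_context_alt (context : List (String × List (List (String × Bool)))) : List (String × Int) :=
  let hist := (pvGetD context "threads" []).foldl
    (fun (h : PySem.Dict (Bool × Bool) Int) t =>
      h.insert (pvStatusKey t) (h.getD (pvStatusKey t) 0 + 1))
    PySem.Dict.empty
  let nonOutdated := hist.getD (false, false) 0
  let outdated := hist.getD (false, true) 0
  [("unresolved", nonOutdated + outdated),
   ("unresolved_non_outdated", nonOutdated),
   ("unresolved_outdated", outdated)]

-- ===== PRECONDITION & SPEC =====
def Spec_thread_counts_from_context (context : List (String × List (List (String × Bool)))) (out : List (String × Int)) : Prop := out = thread_counts_from_context_alt context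
instance (context : List (String × List (List (String × Bool)))) (out : List (String × Int)) : Decidable (Spec_thread_counts_from_context context out) := by unfold Spec_thread_counts_from_context; infer_instance

-- ===== CLAIM =====
def Claim_equal_thread_counts_from_context : Prop := ∀ (context : List (String × List (List (String × Bool)))), Dom_thread_counts_from_context context → Spec_thread_counts_from_context context (thread_counts_from_context context)

-- ===== LEMMAS AND PROOFS =====
-- the histogram fold's bucket k holds the starting value plus the number of threads with status key k
theorem pv_getD_hist (l : List (List (String × Bool))) (d : PySem.Dict (Bool × Bool) Int) (k : Bool × Bool) :
    (l.foldl (fun (h : PySem.Dict (Bool × Bool) Int) t =>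
        h.insert (pvStatusKey t) (h.getD (pvStatusKey t) 0 + 1)) d).getD k 0
    = d.getD k 0 + ((l.countP (fun t => pvStatusKey t = k) : Int)) := by
  induction l generalizing d with
  | nil => simp
  | cons hd tl ih =>
    simp only [List.foldl_cons, List.countP_cons, ih, PySem.Dict.getD_insert]
    by_cases h : pvStatusKey hd = k
    · simp [h]; ring
    · have h' : k ≠ pvStatusKey hd := fun hh => h hh.symm
      simp [h, h']

-- bucket (false, true) = length of A's unresolved-and-outdated list
theorem pv_count_ft (l : List (List (String × Bool))) :
    (l.countP (fun t => pvStatusKey t = (false, true)) : Int)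
    = (((l.filter (fun t => !(pvGetD t "is_resolved" false))).filter
         (fun t => pvGetD t "is_outdated" false)).length : Int) := by
  rw [List.filter_filter, ← List.countP_eq_length_filter]
  congr 1
  apply List.countP_congr
  intro t _
  simp [pvStatusKey, Prod.ext_iff]
  tauto

-- splitting a count by a second predicate
theorem pv_countP_split {α : Type} (p q : α → Bool) (l : List α) :
    l.countP (fun t => p t && !q t) + l.countP (fun t => p t && q t) = l.countP p := by
  induction l with
  | nil => simp
  | cons hd tl ih =>
    simp only [List.countP_cons]
    by_cases hp : p hd <;> by_cases hq : q hd <;> simp [hp, hq] <;> omega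

-- buckets (false, false) + (false, true) = length of A's unresolved list
theorem pv_count_sum (l : List (List (String × Bool))) :
    ((l.countP (fun t => pvStatusKey t = (false, false)) : Int))
    + ((l.countP (fun t => pvStatusKey t = (false, true)) : Int))
    = ((l.filter (fun t => !(pvGetD t "is_resolved" false))).length : Int) := by
  rw [← List.countP_eq_length_filter]
  have h1 : l.countP (fun t => pvStatusKey t = (false, false))
      = l.countP (fun t => !(pvGetD t "is_resolved" false) && !(pvGetD t "is_outdated" false)) := by
    apply List.countP_congr; intro t _; simp [pvStatusKey, Prod.ext_iff]
  have h2 : l.countP (fun t => pvStatusKey t = (false, true))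
      = l.countP (fun t => !(pvGetD t "is_resolved" false) && pvGetD t "is_outdated" false) := by
    apply List.countP_congr; intro t _; simp [pvStatusKey, Prod.ext_iff]
  rw [h1, h2]
  have h3 := pv_countP_split (fun t => !(pvGetD t "is_resolved" false))
    (fun t => pvGetD t "is_outdated" false) l
  push_cast [← h3]
  ring

-- ===== VERDICT =====
theorem thread_counts_from_context_spec : Claim_equal_thread_counts_from_context := by
  intro context _
  unfold Spec_thread_counts_from_context thread_counts_from_context thread_counts_from_context_alt
  simp only [pv_getD_hist, PySem.Dict.getD_empty, zero_add, pv_count_ft]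
  have hs := pv_count_sum (pvGetD context "threads" [])
  have hf := pv_count_ft (pvGetD context "threads" [])
  simp only [List.cons.injEq, Prod.mk.injEq, and_true, true_and]
  refine ⟨?_, ?_⟩ <;> omega
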